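-- pv_equiv track=rewrite | github.com/ksparavec/traceroute_simulator | wsgi/services/tsim_port_parser_service.py | group_by_protocol
-- ===== SOURCE A (Python) =====
-- from typing import List, Tuple, Optional, Dict, Any
--
-- def group_by_protocol(ports: List[Tuple[int, str]]) -> Dict[str, List[int]]:
--     """Group ports by protocol
--
--     Args:
--         ports: List of (port, protocol) tuples
--
--     Returns:
--         Dictionary mapping protocol to list of ports
--     """
--     grouped = {}
--     for port, protocol in ports:
--         if protocol not in grouped:
--             grouped[protocol] = []
--         grouped[protocol].append(port)
--
--     # Sort port lists
--     for protocol in grouped: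
--         grouped[protocol].sort()
--
--     return grouped
-- ===== SOURCE B (Python) =====
-- def group_by_protocol(ports):
--     """Group ports by protocol: one dict comprehension over the distinct
--     protocols (first-occurrence order), each value a sorted per-protocol scan."""
--     return {proto: sorted(p for p, q in ports if q == proto)
--             for proto in dict.fromkeys(q for _, q in ports)}
-- ===== Notes on version B (the rewrite author's own statement) =====
-- stated objective: simpler
-- what changed: Replaces the incremental dict-building loop plus a second in-place per-key sort loop by a single dict comprehension: distinct protocols via dict.fromkeys, each value a sorted filter of the input.
import Mathlib
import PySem

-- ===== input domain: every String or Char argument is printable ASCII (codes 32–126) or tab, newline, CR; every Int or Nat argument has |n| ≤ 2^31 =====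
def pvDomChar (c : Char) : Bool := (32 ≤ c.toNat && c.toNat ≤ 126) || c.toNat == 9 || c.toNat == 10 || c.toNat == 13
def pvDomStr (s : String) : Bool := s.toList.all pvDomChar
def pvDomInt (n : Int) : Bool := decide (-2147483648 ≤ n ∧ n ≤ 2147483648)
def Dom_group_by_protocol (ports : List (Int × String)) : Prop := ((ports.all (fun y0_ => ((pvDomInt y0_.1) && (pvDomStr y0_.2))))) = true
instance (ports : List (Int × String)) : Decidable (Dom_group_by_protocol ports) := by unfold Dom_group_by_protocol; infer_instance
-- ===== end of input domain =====

-- B replaces A's incremental dict-building loop plus a second per-key in-place sort loop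
-- by a single comprehension over the distinct protocols (simpler; same return value).

-- ===== PORT A =====
-- grouped = {}; for port, protocol in ports: if protocol not in grouped: grouped[protocol] = []; grouped[protocol].append(port)
-- for protocol in grouped: grouped[protocol].sort()
def group_by_protocol (ports : List (Int × String)) : List (String × List Int) :=
  let grouped : PySem.Dict String (List Int) :=
    ports.foldl
      (fun d pp =>
        let d := if d.contains pp.2 then d else d.insert pp.2 []
        d.modify pp.2 [] (fun l => l ++ [pp.1]))
      PySem.Dict.empty
  let grouped2 :=
    grouped.keys.foldl
      (fun d k => d.modify k [] (fun l => PySem.List.sorted l (fun x => x)))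
      grouped
  grouped2.items

-- ===== PORT B =====
-- {proto: sorted(p for p, q in ports if q == proto) for proto in dict.fromkeys(q for _, q in ports)}
def group_by_protocol_alt (ports : List (Int × String)) : List (String × List Int) :=
  (PySem.List.dedup (ports.map (fun pp => pp.2))).map
    (fun proto =>
      (proto,
        PySem.List.sorted ((ports.filter (fun pp => pp.2 == proto)).map (fun pp => pp.1))
          (fun x => x)))

-- ===== PRECONDITION & SPEC =====
def Spec_group_by_protocol (ports : List (Int × String)) (out : List (String × List Int)) : Prop := out = group_by_protocol_alt ports
instance (ports : List (Int × String)) (out : List (String × List Int)) : Decidable (Spec_group_by_protocol ports out) := by unfold Spec_group_by_protocol; infer_instance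

-- ===== CLAIM (what is proved, stated in full; the proofs are below) =====
def Claim_equal_group_by_protocol : Prop := ∀ (ports : List (Int × String)), Dom_group_by_protocol ports → Spec_group_by_protocol ports (group_by_protocol ports)

-- ===== LEMMAS AND PROOFS =====

-- A's "if protocol not in grouped: grouped[protocol] = []" followed by append is exactly dict.modify with default [].
theorem pv_step_eq (d : PySem.Dict String (List Int)) (k : String) (f : List Int → List Int)
    (h : d.contains k = false) :
    (d.insert k []).modify k [] f = d.modify k [] f := by
  have hni : ∀ p ∈ d.items, p.1 ≠ k := by
    intro p hp hpk
    have h2 := PySem.Dict.mem_keys_of_mem_items (d := d) hp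
    rw [hpk, ← PySem.Dict.contains_iff_mem_keys] at h2
    simp [h] at h2
  have hg2 : (d.insert k ([]:List Int)).getD k [] = [] := PySem.Dict.getD_insert_self ..
  have hg : d.getD k [] = [] := by
    apply PySem.Dict.getD_of_not_contains
    exact h
  have hmap : d.items.map (fun p => if p.1 = k then (k, f []) else p) = d.items := by
    conv_rhs => rw [← List.map_id d.items]
    exact List.map_congr_left (fun p hp => by simp [hni p hp])
  simp only [PySem.Dict.modify, hg2]
  simp [PySem.Dict.insert, h, List.map_append, hmap, hg]

-- Effect of the per-key sort loop on one lookup (distinct keys: each key is modified once).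
theorem pv_getD_sortfold (ks : List String) (d : PySem.Dict String (List Int)) (k : String)
    (hnd : ks.Nodup) :
    (ks.foldl (fun d k => d.modify k [] (fun l => PySem.List.sorted l (fun x => x))) d).getD k []
      = if k ∈ ks then PySem.List.sorted (d.getD k []) (fun x => x) else d.getD k [] := by
  induction ks generalizing d with
  | nil => simp
  | cons a ks ih =>
    simp only [List.foldl_cons]
    rw [ih _ (List.Nodup.of_cons hnd)]
    by_cases hk : k = a
    · subst hk
      have hknot : k ∉ ks := (List.nodup_cons.mp hnd).1
      simp [hknot, PySem.Dict.getD_modify_self]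
    · simp [PySem.Dict.getD_modify_of_ne, hk, List.mem_cons]

-- Set.update with already-present elements is the identity.
theorem pv_update_self (ks s : List String) (h : ∀ k ∈ ks, k ∈ s) :
    PySem.Set.update s ks = s := by
  induction ks generalizing s with
  | nil => rfl
  | cons a ks ih =>
    have ha : PySem.Set.add s a = s := PySem.Set.add_of_mem (h a (by simp))
    show PySem.Set.update (PySem.Set.add s a) ks = s
    rw [ha]
    exact ih s (fun k hk => h k (by simp [hk]))

theorem group_by_protocol_spec_aux (ports : List (Int × String)) :
    group_by_protocol ports = group_by_protocol_alt ports := by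
  have hstep : (fun (d : PySem.Dict String (List Int)) (pp : Int × String) =>
        let d' := if d.contains pp.2 then d else d.insert pp.2 []
        d'.modify pp.2 [] (fun l => l ++ [pp.1]))
      = fun (d : PySem.Dict String (List Int)) (pp : Int × String) =>
        d.modify pp.2 [] (fun l => l ++ [pp.1]) := by
    funext d pp
    by_cases h : d.contains pp.2 = true
    · simp [h]
    · simp only [Bool.not_eq_true] at h
      simp only [h, Bool.false_eq_true, if_false]
      exact pv_step_eq d pp.2 _ h
  have hG : (ports.foldl
        (fun (d : PySem.Dict String (List Int)) (pp : Int × String) =>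
          let d' := if d.contains pp.2 then d else d.insert pp.2 []
          d'.modify pp.2 [] (fun l => l ++ [pp.1]))
        PySem.Dict.empty)
      = ports.foldl (fun d pp => d.modify pp.2 [] (fun l => l ++ [pp.1])) PySem.Dict.empty := by
    rw [hstep]
  set G : PySem.Dict String (List Int) :=
    ports.foldl (fun d pp => d.modify pp.2 [] (fun l => l ++ [pp.1])) PySem.Dict.empty with hGdef
  have hkeys : G.keys = PySem.List.dedup (ports.map (fun pp => pp.2)) := by
    rw [hGdef, PySem.Dict.keys_foldl_modify_key]
    simp [PySem.List.dedup_eq_ofList, PySem.Set.ofList_eq_foldl, PySem.Set.update,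
          PySem.Dict.keys_empty]
  have hndG : G.keys.Nodup := by
    rw [hGdef]
    exact PySem.Dict.nodup_keys_foldl_modify_key _ _ _ _ _ PySem.Dict.nodup_keys_empty
  have hgetD : ∀ k, G.getD k [] = (ports.filter (fun pp => pp.2 == k)).map (fun pp => pp.1) := by
    intro k
    have hswap : G = (ports.map Prod.swap).foldl
        (fun d p => d.modify p.1 [] (fun l => l ++ [p.2])) PySem.Dict.empty := by
      rw [hGdef, List.foldl_map]
      simp
    rw [hswap, PySem.Dict.getD_foldl_modify_append]
    simp [List.filter_map, List.map_map, Function.comp_def, PySem.Dict.getD_empty]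
  show ((ports.foldl
      (fun (d : PySem.Dict String (List Int)) (pp : Int × String) =>
        let d' := if d.contains pp.2 then d else d.insert pp.2 []
        d'.modify pp.2 [] (fun l => l ++ [pp.1]))
      PySem.Dict.empty).keys.foldl
        (fun d k => d.modify k [] (fun l => PySem.List.sorted l (fun x => x)))
        (ports.foldl
          (fun (d : PySem.Dict String (List Int)) (pp : Int × String) =>
            let d' := if d.contains pp.2 then d else d.insert pp.2 []
            d'.modify pp.2 [] (fun l => l ++ [pp.1]))
          PySem.Dict.empty)).items = group_by_protocol_alt ports
  rw [hG]
  set F : PySem.Dict String (List Int) :=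
    G.keys.foldl (fun d k => d.modify k [] (fun l => PySem.List.sorted l (fun x => x))) G with hFdef
  have hFkeys : F.keys = G.keys := by
    rw [hFdef, PySem.Dict.keys_foldl_modify]
    exact pv_update_self _ _ (fun k hk => hk)
  have hFnodup : F.keys.Nodup := by rw [hFkeys]; exact hndG
  have hitems : F.items = F.keys.map (fun k => (k, F.getD k [])) :=
    PySem.Dict.items_eq_map_keys F hFnodup []
  rw [hitems, hFkeys, hkeys]
  unfold group_by_protocol_alt
  apply List.map_congr_left
  intro k hk
  have hkmem : k ∈ G.keys := by
    rw [hkeys]; exact hk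
  rw [hFdef, pv_getD_sortfold G.keys G k hndG, if_pos hkmem, hgetD k]

-- ===== VERDICT (by name: the statement is the Claim_ definition above) =====
theorem group_by_protocol_spec : Claim_equal_group_by_protocol := by
  intro ports _
  exact group_by_protocol_spec_aux ports
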